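-- pv_equiv track=rewrite | github.com/yemelgen/codecrack | interviews/find_overlaps/solution.py | find_overlaps_v2
-- ===== SOURCE A (Python) =====
-- def find_overlaps_v2( intervals: list[tuple[int]] ) -> int:
--     """ Working solution but O(n^2) """
--     res = []
--     for i, a in enumerate(intervals):
--         for b in [ x for j, x in enumerate(intervals) if j != i ]:
--             #if  b[1] >= a[0] and b[0] <= a[1] :
--             if a[0] < b[1] and  a[1] > b[0]:
--                 res.append(a)
--                 break
--     return res
-- ===== SOURCE B (Python) =====
-- def find_overlaps_v2(intervals):
--     # The overlap test is symmetric, so check each unordered pair once,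
--     # marking both sides, then keep the marked intervals in input order.
--     n = len(intervals)
--     flagged = [False] * n
--     for i in range(n):
--         a = intervals[i]
--         for j in range(i + 1, n):
--             b = intervals[j]
--             if a[0] < b[1] and a[1] > b[0]:
--                 flagged[i] = True
--                 flagged[j] = True
--     return [iv for iv, f in zip(intervals, flagged) if f]
-- ===== Notes on version B (the rewrite author's own statement) =====
-- stated objective: alternative
-- what changed: Instead of scanning all other intervals for each interval (rebuilding an n-element 'others' list per outer iteration), B exploits the symmetry of the overlap test: it checks each unordered pair once in an upper-triangular loop, marking both endpoints in a flag array, and emits the flagged intervals in one final pass.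
-- outside the precondition, e.g. on find_overlaps_v2([(0, 9), (1, 2), (99,)]): A returns [(0, 9), (1, 2)], B raises IndexError
import Mathlib
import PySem

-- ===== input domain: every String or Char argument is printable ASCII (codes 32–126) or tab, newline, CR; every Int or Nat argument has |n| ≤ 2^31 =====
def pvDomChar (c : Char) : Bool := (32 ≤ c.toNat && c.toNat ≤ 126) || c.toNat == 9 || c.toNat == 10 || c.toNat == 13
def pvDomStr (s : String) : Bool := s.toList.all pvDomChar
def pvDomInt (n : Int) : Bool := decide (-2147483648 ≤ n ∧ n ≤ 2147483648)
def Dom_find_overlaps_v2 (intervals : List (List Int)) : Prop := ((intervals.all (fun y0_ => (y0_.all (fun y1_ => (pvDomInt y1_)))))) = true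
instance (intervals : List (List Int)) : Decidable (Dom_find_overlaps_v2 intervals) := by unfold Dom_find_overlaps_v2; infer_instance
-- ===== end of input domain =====

-- B replaces A's per-interval scan over a freshly rebuilt list of the other intervals by a single
-- upper-triangular pair loop (the overlap test is symmetric) that marks both sides in a flag array.

-- ===== PORT A =====
-- a[k] under Pre_ (index always in range there); out of range Python raises IndexError
def pvAIdx (xs : List Int) (k : Int) : Int := (PySem.List.pyGet? xs k).getD 0

-- the inner 'for b in […]: if …: append; break' loop: returns whether a match was found
def pvAInner (a : List Int) (others : List (List Int)) : Bool :=
  match others with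
  | [] => false
  | b :: rest =>
      if pvAIdx a 0 < pvAIdx b 1 ∧ pvAIdx a 1 > pvAIdx b 0 then true
      else pvAInner a rest

def find_overlaps_v2 (intervals : List (List Int)) : List (List Int) :=
  (PySem.List.enumerate intervals 0).foldl
    (fun res p =>
      if pvAInner p.2 (((PySem.List.enumerate intervals 0).filter (fun q => q.1 != p.1)).map (fun q => q.2))
      then res ++ [p.2] else res)
    []

-- ===== PORT B =====
def pvBIdx (xs : List Int) (k : Int) : Int := (PySem.List.pyGet? xs k).getD 0

-- body of the inner loop: compare pair (i, j), mark both flags on overlap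
def pvBStep (intervals : List (List Int)) (a : List Int) (i : Int) (fl : List Bool) (j : Int) : List Bool :=
  let b := PySem.List.pyGetD intervals j []
  if pvBIdx a 0 < pvBIdx b 1 ∧ pvBIdx a 1 > pvBIdx b 0 then
    PySem.List.pySetD (PySem.List.pySetD fl i true) j true
  else fl

def find_overlaps_v2_alt (intervals : List (List Int)) : List (List Int) :=
  let n : Int := intervals.length
  let flagged :=
    (PySem.List.pyRange 0 n 1).foldl
      (fun fl i =>
        (PySem.List.pyRange (i + 1) n 1).foldl
          (fun fl2 j => pvBStep intervals (PySem.List.pyGetD intervals i []) i fl2 j) fl)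
      (List.replicate intervals.length false)
  ((intervals.zip flagged).filter (fun p => p.2)).map (fun p => p.1)

-- ===== PRECONDITION & SPEC =====
-- Pre_ excludes inputs with ≥ 2 intervals where some interval has fewer than 2 endpoints: there A
-- usually raises IndexError, and on the rare such inputs where short-circuit evaluation lets A
-- return, B's pair order hits the missing endpoint and raises.
def Pre_find_overlaps_v2 (intervals : List (List Int)) : Prop :=
  intervals.length ≤ 1 ∨ ∀ r ∈ intervals, 2 ≤ r.length
instance (intervals : List (List Int)) : Decidable (Pre_find_overlaps_v2 intervals) := by unfold Pre_find_overlaps_v2; infer_instance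

def pvWitness_find_overlaps_v2 : List (List Int) := [[0, 3], [2, 5], [7, 8]]

def Spec_find_overlaps_v2 (intervals : List (List Int)) (out : List (List Int)) : Prop := out = find_overlaps_v2_alt intervals
instance (intervals : List (List Int)) (out : List (List Int)) : Decidable (Spec_find_overlaps_v2 intervals out) := by unfold Spec_find_overlaps_v2; infer_instance

-- ===== CLAIM (what is proved, stated in full; the proofs are below) =====
def Claim_equal_find_overlaps_v2 : Prop := ∀ (intervals : List (List Int)), Dom_find_overlaps_v2 intervals → Pre_find_overlaps_v2 intervals → Spec_find_overlaps_v2 intervals (find_overlaps_v2 intervals)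

-- ===== LEMMAS AND PROOFS =====

-- the strict-overlap test on two rows, and the reference form both ports are reduced to:
-- keep index k iff some other index m overlaps it
def pvCond (a b : List Int) : Bool := decide (pvAIdx a 0 < pvAIdx b 1 ∧ pvAIdx a 1 > pvAIdx b 0)

def pvKeep (l : List (List Int)) (k : Nat) : Bool :=
  (List.range l.length).any (fun m => (m != k) && pvCond (l.getD k []) (l.getD m []))

def pvRef (l : List (List Int)) : List (List Int) :=
  ((List.range l.length).filter (pvKeep l)).map (fun k => l.getD k [])

theorem pvAInner_eq_any (a : List Int) (others : List (List Int)) :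
    pvAInner a others = others.any (fun b => pvCond a b) := by
  induction others with
  | nil => rfl
  | cons b rest ih => simp [pvAInner, pvCond, ih]

theorem A_eq_ref (l : List (List Int)) : find_overlaps_v2 l = pvRef l := by
  unfold find_overlaps_v2
  simp only [PySem.List.foldl_append_if, List.nil_append]
  rw [PySem.List.enumerate_eq_map_pyRange l []]
  simp only [PySem.List.len_eq]
  rw [PySem.List.pyRange_zero_nat]
  simp only [List.map_map, List.filter_map, pvAInner_eq_any, List.any_map]
  unfold pvRef pvKeep
  have hb : ∀ a x : Nat, ((a : Int) != (x : Int)) = (a != x) := by intro a x; simp [bne]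
  simp [Function.comp_def, List.any_filter, hb]

theorem pvCond_symm (a b : List Int) : pvCond a b = pvCond b a := by
  simp only [pvCond, decide_eq_decide]; constructor <;> exact fun h => ⟨h.2, h.1⟩

-- the pair-condition as seen by B's loop
def pvPairC (l : List (List Int)) (i j : Int) : Bool :=
  decide (pvBIdx (PySem.List.pyGetD l i []) 0 < pvBIdx (PySem.List.pyGetD l j []) 1 ∧
          pvBIdx (PySem.List.pyGetD l i []) 1 > pvBIdx (PySem.List.pyGetD l j []) 0)

theorem pvBStep_length (l : List (List Int)) (a : List Int) (i : Int) (fl : List Bool) (j : Int) :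
    (pvBStep l a i fl j).length = fl.length := by
  unfold pvBStep
  dsimp only
  split <;> simp [PySem.List.length_pySetD]

theorem pvBStep_getD (l : List (List Int)) (a : List Int) (i : Int) (fl : List Bool) (j : Int)
    (hi0 : 0 ≤ i) (hil : i < (fl.length : Int)) (hj0 : 0 ≤ j) (hjl : j < (fl.length : Int)) (k : Nat) :
    (pvBStep l a i fl j).getD k false
      = (fl.getD k false ||
         (decide (pvBIdx a 0 < pvBIdx (PySem.List.pyGetD l j []) 1 ∧
                  pvBIdx a 1 > pvBIdx (PySem.List.pyGetD l j []) 0) &&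
          (((k : Int) == i) || ((k : Int) == j)))) := by
  unfold pvBStep
  dsimp only
  split
  · rename_i h
    have hi : i.toNat < fl.length := by omega
    have hj : j.toNat < fl.length := by omega
    have e1 : ((k : Int) == i) = (k == i.toNat) := by
      have h' : ((k : Int) = i) ↔ (k = i.toNat) := by omega
      simp [h']
    have e2 : ((k : Int) == j) = (k == j.toNat) := by
      have h' : ((k : Int) = j) ↔ (k = j.toNat) := by omega
      simp [h']
    rw [PySem.List.pySetD_of_nonneg _ _ hj0, PySem.List.pySetD_of_nonneg _ _ hi0, e1, e2]
    simp only [h]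
    simp only [List.getD_eq_getElem?_getD, List.getElem?_set, List.length_set]
    by_cases hkj : j.toNat = k
    · subst hkj; simp [hj]
    · by_cases hki : i.toNat = k
      · subst hki; simp [hi, hkj]
      · have h1 : ¬ k = i.toNat := fun hh => hki hh.symm
        have h2 : ¬ k = j.toNat := fun hh => hkj hh.symm
        simp [hki, hkj, h1, h2]
  · simp_all

-- inner loop characterisation
theorem inner_spec (l : List (List Int)) (a : List Int) (i : Int)
    (hi0 : 0 ≤ i) (js : List Int) (fl : List Bool)
    (hil : i < (fl.length : Int))
    (hjs : ∀ j ∈ js, 0 ≤ j ∧ j < (fl.length : Int)) (k : Nat) :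
    ((js.foldl (fun fl2 j => pvBStep l a i fl2 j) fl)).getD k false
      = (fl.getD k false ||
         js.any (fun j =>
           decide (pvBIdx a 0 < pvBIdx (PySem.List.pyGetD l j []) 1 ∧
                   pvBIdx a 1 > pvBIdx (PySem.List.pyGetD l j []) 0) &&
           (((k : Int) == i) || ((k : Int) == j)))) := by
  induction js generalizing fl with
  | nil => simp
  | cons j rest ih =>
      have hj := hjs j (by simp)
      have hlen := pvBStep_length l a i fl j
      rw [List.foldl_cons, ih (pvBStep l a i fl j) (by rw [hlen]; exact hil)
            (fun x hx => by rw [hlen]; exact hjs x (by simp [hx])),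
          pvBStep_getD l a i fl j hi0 hil hj.1 hj.2 k]
      simp [Bool.or_assoc]

theorem inner_foldl_length (l : List (List Int)) (a : List Int) (i : Int) :
    ∀ (js : List Int) (fl : List Bool),
      (js.foldl (fun fl2 j => pvBStep l a i fl2 j) fl).length = fl.length := by
  intro js
  induction js with
  | nil => intro fl; rfl
  | cons j rest ih => intro fl; rw [List.foldl_cons, ih, pvBStep_length]

theorem outer_spec (l : List (List Int)) (is : List Int) :
    ∀ (fl : List Bool), fl.length = l.length →
      (∀ i ∈ is, 0 ≤ i ∧ i < (l.length : Int)) → ∀ k : Nat,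
      ((is.foldl (fun fl i =>
          (PySem.List.pyRange (i + 1) (l.length : Int) 1).foldl
            (fun fl2 j => pvBStep l (PySem.List.pyGetD l i []) i fl2 j) fl) fl)).getD k false
        = (fl.getD k false ||
           is.any (fun i => (PySem.List.pyRange (i + 1) (l.length : Int) 1).any
             (fun j => pvPairC l i j && (((k : Int) == i) || ((k : Int) == j))))) := by
  induction is with
  | nil => intro fl _ _ k; simp
  | cons i rest ih =>
      intro fl hfl his k
      have hi := his i (by simp)
      rw [List.foldl_cons,
          ih _ (by rw [inner_foldl_length, hfl]) (fun x hx => his x (by simp [hx])) k,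
          inner_spec l (PySem.List.pyGetD l i []) i hi.1 _ fl (by rw [hfl]; exact hi.2)
            (fun j hj => by
              rw [PySem.List.mem_pyRange_one] at hj
              constructor
              · omega
              · rw [hfl]; exact hj.2) k]
      simp [pvPairC, Bool.or_assoc]

theorem zip_filter_map {α : Type} (d : α) :
    ∀ (l : List α) (fl : List Bool), fl.length = l.length →
      ((l.zip fl).filter (fun p => p.2)).map (fun p => p.1)
        = ((List.range l.length).filter (fun k => fl.getD k false)).map (fun k => l.getD k d) := by
  intro l
  induction l with
  | nil => intro fl _; simp
  | cons x t ih =>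
      intro fl hfl
      cases fl with
      | nil => simp at hfl
      | cons b ft =>
          have hfl' : ft.length = t.length := by simpa using hfl
          rw [show (x :: t).length = t.length + 1 from rfl, List.range_succ_eq_map]
          simp only [List.zip_cons_cons, List.filter_cons, List.filter_map]
          cases b <;>
            simp [ih ft hfl', List.map_map, Function.comp_def]

theorem pvPairC_eq (l : List (List Int)) (i j : Int) (hi : 0 ≤ i) (hi2 : i < (l.length : Int))
    (hj : 0 ≤ j) (hj2 : j < (l.length : Int)) :
    pvPairC l i j = pvCond (l.getD i.toNat []) (l.getD j.toNat []) := by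
  rw [pvPairC, pvCond,
      PySem.List.pyGetD_eq_getElem l [] hi hi2, PySem.List.pyGetD_eq_getElem l [] hj hj2]
  have e1 : l[i.toNat] = l.getD i.toNat [] := by rw [List.getD_eq_getElem _ _ (by omega)]
  have e2 : l[j.toNat] = l.getD j.toNat [] := by rw [List.getD_eq_getElem _ _ (by omega)]
  rw [e1, e2]; rfl

theorem double_any_eq_keep (l : List (List Int)) (k : Nat) (hk : k < l.length) :
    (PySem.List.pyRange 0 (l.length : Int) 1).any
      (fun i => (PySem.List.pyRange (i + 1) (l.length : Int) 1).any
        (fun j => pvPairC l i j && (((k : Int) == i) || ((k : Int) == j))))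
      = pvKeep l k := by
  rw [Bool.eq_iff_iff]
  simp only [List.any_eq_true, PySem.List.mem_pyRange_one, pvKeep, List.mem_range]
  constructor
  · rintro ⟨i, ⟨hi0, hin⟩, j, ⟨hij, hjn⟩, hc⟩
    simp only [Bool.and_eq_true, Bool.or_eq_true, beq_iff_eq] at hc
    obtain ⟨hcond, hk'⟩ := hc
    rw [pvPairC_eq l i j hi0 hin (by omega) hjn] at hcond
    rcases hk' with hki | hkj
    · refine ⟨j.toNat, by omega, ?_⟩
      simp only [Bool.and_eq_true, bne_iff_ne]
      refine ⟨by omega, ?_⟩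
      rwa [show i.toNat = k by omega] at hcond
    · refine ⟨i.toNat, by omega, ?_⟩
      simp only [Bool.and_eq_true, bne_iff_ne]
      refine ⟨by omega, ?_⟩
      rw [pvCond_symm]
      rwa [show j.toNat = k by omega] at hcond
  · rintro ⟨m, hm, hc⟩
    simp only [Bool.and_eq_true, bne_iff_ne] at hc
    obtain ⟨hmk, hcond⟩ := hc
    rcases Nat.lt_or_gt_of_ne hmk with hlt | hgt
    · -- m < k : pair (m, k)
      refine ⟨(m : Int), ⟨by omega, by omega⟩, (k : Int), ⟨by omega, by omega⟩, ?_⟩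
      simp only [Bool.and_eq_true, Bool.or_eq_true, beq_iff_eq]
      refine ⟨?_, by simp⟩
      rw [pvPairC_eq l m k (by omega) (by omega) (by omega) (by omega)]
      simp only [Int.toNat_natCast]
      rw [pvCond_symm]; exact hcond
    · -- k < m : pair (k, m)
      refine ⟨(k : Int), ⟨by omega, by omega⟩, (m : Int), ⟨by omega, by omega⟩, ?_⟩
      simp only [Bool.and_eq_true, Bool.or_eq_true, beq_iff_eq]
      refine ⟨?_, by simp⟩
      rw [pvPairC_eq l k m (by omega) (by omega) (by omega) (by omega)]
      simp only [Int.toNat_natCast]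
      exact hcond

theorem outer_foldl_length (l : List (List Int)) :
    ∀ (is : List Int) (fl : List Bool),
      ((is.foldl (fun fl i =>
          (PySem.List.pyRange (i + 1) (l.length : Int) 1).foldl
            (fun fl2 j => pvBStep l (PySem.List.pyGetD l i []) i fl2 j) fl) fl)).length = fl.length := by
  intro is
  induction is with
  | nil => intro fl; rfl
  | cons i rest ih => intro fl; rw [List.foldl_cons, ih, inner_foldl_length]

theorem B_eq_ref (l : List (List Int)) : find_overlaps_v2_alt l = pvRef l := by
  unfold find_overlaps_v2_alt
  dsimp only
  have hlen : ((PySem.List.pyRange 0 (l.length : Int) 1).foldl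
      (fun fl i => (PySem.List.pyRange (i + 1) (l.length : Int) 1).foldl
        (fun fl2 j => pvBStep l (PySem.List.pyGetD l i []) i fl2 j) fl)
      (List.replicate l.length false)).length = l.length := by
    rw [outer_foldl_length, List.length_replicate]
  rw [zip_filter_map ([] : List Int) l _ hlen]
  unfold pvRef
  congr 1
  apply List.filter_congr
  intro k hk
  rw [List.mem_range] at hk
  rw [outer_spec l _ _ (by simp) (fun i hi => by rwa [PySem.List.mem_pyRange_one] at hi) k]
  have hrep : (List.replicate l.length false).getD k false = false := by
    rw [List.getD_eq_getElem?_getD, List.getElem?_replicate]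
    split <;> rfl
  rw [hrep, Bool.false_or]
  exact double_any_eq_keep l k hk

-- ===== VERDICT (by name: the statement is the Claim_ definition above) =====
theorem find_overlaps_v2_spec : Claim_equal_find_overlaps_v2 := by
  intro l _ _
  unfold Spec_find_overlaps_v2
  rw [A_eq_ref, B_eq_ref]
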